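-- pv_equiv track=rewrite | github.com/Slendergator/new-vegas-terminal-solver | new_vegas_solver.py | find_best_guess
-- ===== SOURCE A (Python) =====
-- from collections import Counter
--
-- def likeness(word_a: str, word_b: str) -> int:
--     """Return the number of positions where the two words have the same letter."""
--     return sum(1 for a, b in zip(word_a, word_b) if a == b)
--
-- def max_remaining_after_guess(candidate: str, words: list[str]) -> int:
--     """For a candidate guess, return the maximum number of words that could remain for any likeness score."""
--     score_counts: Counter[int] = Counter()
--     for target in words:
--         if candidate == target:
--             continue
--         score_counts[likeness(candidate, target)] += 1
--     return max(score_counts.values()) if score_counts else 0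
--
-- def find_best_guess(words: list[str]) -> str:
--     """Pick the word that minimizes the worst-case number of remaining words."""
--     if len(words) <= 2:
--         return words[0]
--
--     best_word = words[0]
--     min_max_remaining = len(words)
--
--     for candidate in words:
--         worst = max_remaining_after_guess(candidate, words)
--         if worst < min_max_remaining:
--             min_max_remaining = worst
--             best_word = candidate
--
--     return best_word
-- ===== SOURCE B (Python) =====
-- def find_best_guess(words: list[str]) -> str:
--     """Pick the word that minimizes the worst-case number of remaining words."""
--     if len(words) <= 2:
--         return words[0]
--     worsts = []
--     for c in words:
--         # sort the likeness scores against all other words (by value, matching A's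
--         # duplicate skip); the worst case is the longest run of equal scores
--         scores = sorted(sum(1 for a, b in zip(c, t) if a == b)
--                         for t in words if t != c)
--         best = cur = 0
--         prev = None
--         for s in scores:
--             cur = cur + 1 if s == prev else 1
--             if cur > best:
--                 best = cur
--             prev = s
--         worsts.append(best)
--     return words[worsts.index(min(worsts))]
-- ===== Notes on version B (the rewrite author's own statement) =====
-- stated objective: alternative
-- what changed: B drops the Counter histogram entirely: per candidate it sorts the list of likeness scores and takes the longest run of equal adjacent scores as the worst case (sort-then-scan instead of hash counting), collects all worst cases in a list and selects by first index of the minimum instead of A's running best/min fold.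
import Mathlib
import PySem

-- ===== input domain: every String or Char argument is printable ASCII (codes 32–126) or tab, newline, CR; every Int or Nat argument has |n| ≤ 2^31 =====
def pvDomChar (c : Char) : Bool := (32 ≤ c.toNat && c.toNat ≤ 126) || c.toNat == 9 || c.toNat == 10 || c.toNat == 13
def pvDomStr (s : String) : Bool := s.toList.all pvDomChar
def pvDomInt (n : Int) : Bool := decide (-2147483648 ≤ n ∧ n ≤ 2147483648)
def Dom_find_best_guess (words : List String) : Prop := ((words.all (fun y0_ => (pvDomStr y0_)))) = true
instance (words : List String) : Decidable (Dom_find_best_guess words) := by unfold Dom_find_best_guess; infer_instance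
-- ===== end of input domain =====

-- B replaces A's Counter histogram by sort-then-scan: per candidate it sorts the likeness
-- scores and takes the longest run of equal adjacent scores, then picks the first index of
-- the minimal worst case (objective: alternative, same asymptotic cost).

-- ===== PORT A =====
def likeness (word_a word_b : String) : Int :=
  (((word_a.toList.zip word_b.toList).filter (fun p => p.1 == p.2)).map (fun _ => (1 : Int))).sum

def max_remaining_after_guess (candidate : String) (words : List String) : Int :=
  let score_counts : PySem.Dict Int Int := words.foldl
    (fun d target => if candidate == target then d
      else d.modify (likeness candidate target) 0 (fun x => x + 1))
    PySem.Dict.empty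
  if score_counts.size = 0 then 0
  else (PySem.List.max? score_counts.values (fun v => v)).getD 0

def find_best_guess (words : List String) : String :=
  if PySem.List.len words ≤ 2 then PySem.List.pyGetD words 0 "" else
  (words.foldl
    (fun s candidate =>
      let worst := max_remaining_after_guess candidate words
      if worst < s.2 then (candidate, worst) else s)
    (PySem.List.pyGetD words 0 "", PySem.List.len words)).1

-- ===== PORT B =====
-- the inline generator 'sum(1 for a, b in zip(c, t) if a == b)'
def pvScore (c t : String) : Int :=
  (((c.toList.zip t.toList).filter (fun p => p.1 == p.2)).map (fun _ => (1 : Int))).sum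

-- one step of B's run scan over the sorted scores: state (best, cur, prev)
def pvRunStep (st : Int × Int × Option Int) (s : Int) : Int × Int × Option Int :=
  let cur := if some s == st.2.2 then st.2.1 + 1 else 1
  let best := if cur > st.1 then cur else st.1
  (best, cur, some s)

-- B's per-candidate body: sorted scores, then longest run of equal adjacent scores
def pvWorstB (words : List String) (c : String) : Int :=
  let scores := PySem.List.sorted ((words.filter (fun t => t != c)).map (fun t => pvScore c t))
      (fun s => s) false
  (scores.foldl pvRunStep (0, 0, (none : Option Int))).1

def find_best_guess_alt (words : List String) : String :=
  if PySem.List.len words ≤ 2 then PySem.List.pyGetD words 0 "" else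
  let worsts := words.foldl (fun acc c => acc ++ [pvWorstB words c]) []
  let m := (PySem.List.min? worsts (fun v => v)).getD 0
  PySem.List.pyGetD words (((PySem.List.index? worsts m).getD 0 : Nat) : Int) ""

-- ===== PRECONDITION & SPEC =====
-- Pre_ excludes only the empty list, on which A raises IndexError at words[0].
def Pre_find_best_guess (words : List String) : Prop := words ≠ []
instance (words : List String) : Decidable (Pre_find_best_guess words) := by
  unfold Pre_find_best_guess; infer_instance
def pvWitness_find_best_guess : List String := ["abc", "abd", "xyz", "xbc"]

def Spec_find_best_guess (words : List String) (out : String) : Prop := out = find_best_guess_alt words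
instance (words : List String) (out : String) : Decidable (Spec_find_best_guess words out) := by
  unfold Spec_find_best_guess; infer_instance

-- ===== CLAIM (what is proved, stated in full; the proofs are below) =====
def Claim_equal_find_best_guess : Prop := ∀ (words : List String), Dom_find_best_guess words → Pre_find_best_guess words → Spec_find_best_guess words (find_best_guess words)

-- ===== LEMMAS AND PROOFS =====

-- the common quantity: the largest multiplicity of any value of L (0 for empty L)
def pvM (L : List Int) : Int :=
  ((PySem.List.dedup L).map (fun x => (L.count x : Int))).foldl max 0

theorem pv_fold_max_le (l1 l2 : List Int)
    (h : ∀ x ∈ l1, ∃ y ∈ l2, x ≤ y) :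
    l1.foldl max 0 ≤ l2.foldl max 0 := by
  rcases PySem.List.foldl_max_mem l1 0 with h0 | hm
  · rw [h0]; exact (PySem.List.le_foldl_max l2 0).1
  · obtain ⟨y, hy, hxy⟩ := h _ hm
    exact le_trans hxy ((PySem.List.le_foldl_max l2 0).2 y hy)

theorem pv_M_congr (S L : List Int)
    (hmem : ∀ x, x ∈ S ↔ x ∈ L) (hcnt : ∀ x, S.count x = L.count x) :
    pvM S = pvM L := by
  unfold pvM
  apply le_antisymm <;> apply pv_fold_max_le <;> intro x hx <;>
    obtain ⟨y, hy, rfl⟩ := List.mem_map.1 hx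
  · exact ⟨(L.count y : Int), List.mem_map_of_mem
      ((PySem.List.mem_dedup _ _).2 ((hmem y).1 ((PySem.List.mem_dedup _ _).1 hy))),
      by rw [hcnt y]⟩
  · exact ⟨(S.count y : Int), List.mem_map_of_mem
      ((PySem.List.mem_dedup _ _).2 ((hmem y).2 ((PySem.List.mem_dedup _ _).1 hy))),
      by rw [hcnt y]⟩

theorem pv_dedup_append (q : List Int) (s : Int) :
    PySem.List.dedup (q ++ [s])
      = if s ∈ q then PySem.List.dedup q else PySem.List.dedup q ++ [s] := by
  rw [PySem.List.dedup_eq_ofList, PySem.List.dedup_eq_ofList]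
  have h1 : PySem.Set.ofList (q ++ [s]) = PySem.Set.add (PySem.Set.ofList q) s := by
    rw [PySem.Set.ofList_eq_foldl, PySem.Set.ofList_eq_foldl, List.foldl_append]; rfl
  rw [h1]
  simp [PySem.Set.add, PySem.Set.contains]

theorem pv_count_append (q : List Int) (s y : Int) :
    (q ++ [s]).count y = q.count y + (if y = s then 1 else 0) := by
  rw [List.count_append]
  by_cases h : y = s
  · subst h; simp
  · simp [h, Ne.symm h]

theorem pv_M_append (q : List Int) (s : Int) :
    pvM (q ++ [s]) = max (pvM q) ((q.count s : Int) + 1) := by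
  unfold pvM
  rw [pv_dedup_append]
  by_cases hs : s ∈ q
  · rw [if_pos hs]
    have hsD : s ∈ PySem.List.dedup q := (PySem.List.mem_dedup _ _).2 hs
    apply le_antisymm
    · rcases PySem.List.foldl_max_mem ((PySem.List.dedup q).map (fun x => ((q ++ [s]).count x : Int))) 0 with h0 | hm
      · rw [h0]
        have : (0:Int) ≤ (q.count s : Int) + 1 := by positivity
        exact le_trans this (le_max_right _ _)
      · obtain ⟨y, hy, hyv⟩ := List.mem_map.1 hm
        rw [← hyv]
        by_cases hys : y = s
        · subst hys
          rw [pv_count_append, if_pos rfl]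
          push_cast
          exact le_max_right _ _
        · rw [pv_count_append, if_neg hys, Nat.add_zero]
          exact le_trans
            ((PySem.List.le_foldl_max ((PySem.List.dedup q).map (fun x => (q.count x : Int))) 0).2
              _ (List.mem_map_of_mem hy)) (le_max_left _ _)
    · apply max_le
      · apply pv_fold_max_le
        intro v hv
        obtain ⟨y, hy, rfl⟩ := List.mem_map.1 hv
        refine ⟨((q ++ [s]).count y : Int), List.mem_map_of_mem hy, ?_⟩
        rw [pv_count_append]
        push_cast
        split_ifs <;> omega
      · have := (PySem.List.le_foldl_max ((PySem.List.dedup q).map (fun x => ((q ++ [s]).count x : Int))) 0).2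
          _ (List.mem_map_of_mem hsD)
        rw [pv_count_append, if_pos rfl] at this
        push_cast at this ⊢
        exact this
  · rw [if_neg hs]
    have hc0 : q.count s = 0 := List.count_eq_zero.2 hs
    rw [List.map_append, List.foldl_append]
    simp only [List.map_cons, List.map_nil, List.foldl_cons, List.foldl_nil]
    rw [pv_count_append]
    simp only [hc0, Nat.zero_add]
    have hmap : (PySem.List.dedup q).map (fun x => ((q ++ [s]).count x : Int))
        = (PySem.List.dedup q).map (fun x => (q.count x : Int)) := by
      apply List.map_congr_left
      intro y hy
      rw [pv_count_append, if_neg, Nat.add_zero]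
      intro h; exact hs (h ▸ (PySem.List.mem_dedup _ _).1 hy)
    rw [hmap]
    push_cast
    rfl

-- run-scan invariant over a sorted list
theorem pvRunStep_eq (b c : Int) (p : Option Int) (s : Int) :
    pvRunStep (b, c, p) s
      = (max b (if some s = p then c + 1 else 1), (if some s = p then c + 1 else 1), some s) := by
  simp only [pvRunStep, beq_iff_eq]
  have hmax : ∀ v : Int, (if v > b then v else b) = max b v := by
    intro v
    split_ifs with h
    · exact (max_eq_right (le_of_lt h)).symm
    · exact (max_eq_left (by omega)).symm
  by_cases h : some s = p
  · rw [if_pos h, hmax]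
  · rw [if_neg h, hmax]

theorem pv_run_aux (rest : List Int) : ∀ (q : List Int) (x : Int), x ∈ q →
    (∀ y ∈ q, y ≤ x) → (q ++ rest).Pairwise (· ≤ ·) →
    (rest.foldl pvRunStep (pvM q, (q.count x : Int), some x)).1 = pvM (q ++ rest) := by
  induction rest with
  | nil => intro q x _ _ _; simp
  | cons s r ih =>
    intro q x hxq hyx hpw
    rw [List.pairwise_append] at hpw
    obtain ⟨hq, hsr, hcross⟩ := hpw
    have hxs : x ≤ s := hcross x hxq s List.mem_cons_self
    have hstep : pvRunStep (pvM q, (q.count x : Int), some x) s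
        = (pvM (q ++ [s]), ((q ++ [s]).count s : Int), some s) := by
      rw [pvRunStep_eq, pv_M_append, pv_count_append, if_pos rfl]
      by_cases hsx : s = x
      · rw [if_pos (by rw [hsx]), hsx]
        push_cast
        rfl
      · have hsq : s ∉ q := fun hm => hsx (le_antisymm (hyx s hm) hxs)
        have hc0 : q.count s = 0 := List.count_eq_zero.2 hsq
        rw [if_neg (by simpa using hsx), hc0]
        norm_num
    rw [List.foldl_cons, hstep]
    have h1 : s ∈ q ++ [s] := by simp
    have h2 : ∀ y ∈ q ++ [s], y ≤ s := by
      intro y hy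
      rcases List.mem_append.1 hy with h | h
      · exact hcross y h s List.mem_cons_self
      · simp at h; omega
    have h3 : ((q ++ [s]) ++ r).Pairwise (· ≤ ·) := by
      rw [List.append_assoc, List.singleton_append]
      rw [List.pairwise_append]
      exact ⟨hq, hsr, hcross⟩
    have := ih (q ++ [s]) s h1 h2 h3
    rwa [List.append_assoc, List.singleton_append] at this

theorem pv_run_eq (S : List Int) (hS : S.Pairwise (· ≤ ·)) :
    (S.foldl pvRunStep (0, 0, (none : Option Int))).1 = pvM S := by
  cases S with
  | nil => rfl
  | cons x r =>
    rw [List.foldl_cons]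
    have h1 : pvRunStep (0, 0, (none : Option Int)) x
        = (pvM [x], (([x] : List Int).count x : Int), some x) := by
      simp [pvRunStep, pvM, PySem.List.dedup_eq_ofList, PySem.Set.ofList_eq_foldl,
        PySem.Set.add, PySem.Set.contains]
    rw [h1]
    have := pv_run_aux r [x] x (by simp) (by simp) (by simpa using hS)
    simpa using this

-- A's per-candidate result as pvM
theorem pv_dictA (candidate : String) (words : List String) :
    words.foldl (fun d target => if candidate == target then d
        else d.modify (likeness candidate target) 0 (fun x => x + 1)) PySem.Dict.empty
      = PySem.Dict.counter
          ((words.filter (fun t => !(candidate == t))).map (likeness candidate)) := by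
  rw [PySem.Dict.counter_eq_foldl, List.foldl_map, List.foldl_filter]
  apply PySem.List.foldl_congr_mem
  intro acc x _
  by_cases h : candidate == x
  · simp [h]
  · simp [h]

theorem pv_A_eq_M (L : List Int) :
    (if (PySem.Dict.counter L).size = 0 then (0:Int)
     else (PySem.List.max? (PySem.Dict.counter L).values (fun v => v)).getD 0) = pvM L := by
  have hk : (PySem.Dict.counter L).keys = PySem.List.dedup L := by
    rw [PySem.Dict.keys_counter, PySem.List.dedup_eq_ofList]
  have hsz : (PySem.Dict.counter L).size = (PySem.List.dedup L).length := by
    have h1 : (PySem.Dict.counter L).size = (PySem.Dict.counter L).keys.length := by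
      simp [PySem.Dict.size, PySem.Dict.keys]
    rw [h1, hk]
  cases hD : PySem.List.dedup L with
  | nil =>
    have hL : L = [] := by
      by_contra hne
      obtain ⟨a, ha⟩ := List.exists_mem_of_ne_nil L hne
      have := (PySem.List.mem_dedup L a).2 ha
      rw [hD] at this
      cases this
    subst hL
    rfl
  | cons k ks =>
    rw [if_neg (by rw [hsz, hD]; simp)]
    rw [PySem.Dict.values_eq_map_keys _ (PySem.Dict.nodup_keys_counter L) 0, hk, hD]
    rw [List.map_cons, PySem.List.max?_id_cons]
    simp only [Option.getD_some, PySem.Dict.getD_counter]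
    have hkL : k ∈ L := by
      have : k ∈ PySem.List.dedup L := by rw [hD]; exact List.mem_cons_self
      exact (PySem.List.mem_dedup L k).1 this
    have h0 : max 0 ((L.count k : Int)) = (L.count k : Int) := by
      rw [max_eq_right]; exact_mod_cast Nat.zero_le _
    unfold pvM
    rw [hD, List.map_cons, List.foldl_cons, h0]

theorem pv_worstB_eq (words : List String) (c : String) :
    pvWorstB words c = max_remaining_after_guess c words := by
  have hfilter : (words.filter (fun t => t != c)).map (fun t => pvScore c t)
      = (words.filter (fun t => !(c == t))).map (likeness c) := by
    rw [List.filter_congr (fun t _ => by simp [bne, eq_comm] : ∀ t ∈ words, (t != c) = !(c == t))]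
    rfl
  simp only [pvWorstB, max_remaining_after_guess, pv_dictA, hfilter]
  set L := (words.filter (fun t => !(c == t))).map (likeness c) with hL
  rw [pv_run_eq _ (by simpa using PySem.List.sorted_pairwise L (fun s => s))]
  rw [pv_A_eq_M]
  have hperm := PySem.List.sorted_perm L (fun s => s) false
  exact pv_M_congr _ _ (fun x => hperm.mem_iff) (fun x => hperm.count_eq x)

-- selection machinery (A's running best/min fold vs B's index-of-min)
theorem pv_foldl_min_min (l : List Int) (a b : Int) :
    l.foldl min (min a b) = min a (l.foldl min b) := by
  induction l generalizing b with
  | nil => rfl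
  | cons x t ih => simp only [List.foldl_cons, min_assoc, ih]

theorem pv_le_foldl_min (l : List Int) (a : Int) (h : ∀ x ∈ l, a ≤ x) :
    a ≤ l.foldl min a := by
  induction l with
  | nil => simp
  | cons x t ih =>
    simp only [List.foldl_cons]
    rw [min_eq_left (h x (by simp))]
    exact ih (fun y hy => h y (by simp [hy]))

theorem pv_sel_no_update {α : Type} (f : α → Int) (t : List α) (b : α) (m : Int)
    (h : ∀ x ∈ t, ¬ f x < m) :
    t.foldl (fun s c => if f c < s.2 then (c, f c) else s) (b, m) = (b, m) := by
  induction t with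
  | nil => rfl
  | cons x t ih =>
    simp only [List.foldl_cons, if_neg (h x (by simp))]
    exact ih (fun y hy => h y (by simp [hy]))

theorem pv_worst_lt (candidate : String) (words : List String) (hc : candidate ∈ words) :
    max_remaining_after_guess candidate words < PySem.List.len words := by
  have hlen : (0:Int) < PySem.List.len words := by
    have := List.length_pos_of_mem hc
    unfold PySem.List.len; exact_mod_cast this
  simp only [max_remaining_after_guess, pv_dictA]
  set L := (words.filter (fun t => !(candidate == t))).map (likeness candidate) with hL
  have hLlen : L.length < words.length := by
    rw [hL, List.length_map]
    exact List.length_filter_lt_length_iff_exists.mpr ⟨candidate, hc, by simp⟩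
  by_cases hsz : (PySem.Dict.counter L).size = 0
  · rw [if_pos hsz]
    exact hlen
  · rw [if_neg hsz]
    have hvne : (PySem.Dict.counter L).values ≠ [] := by
      intro h
      apply hsz
      unfold PySem.Dict.size
      unfold PySem.Dict.values at h
      simpa using congrArg List.length h
    obtain ⟨mv, hmv⟩ : ∃ mv, PySem.List.max? (PySem.Dict.counter L).values (fun v => v) = some mv := by
      cases h : PySem.List.max? (PySem.Dict.counter L).values (fun v => v) with
      | none => exact absurd ((PySem.List.max?_eq_none_iff _ _).mp h) hvne
      | some mv => exact ⟨mv, rfl⟩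
    rw [hmv]
    simp only [Option.getD_some]
    have hmem : mv ∈ (PySem.Dict.counter L).values := PySem.List.max?_mem hmv
    rw [PySem.Dict.values_eq_map_keys _ (PySem.Dict.nodup_keys_counter L) 0] at hmem
    obtain ⟨k, _, rfl⟩ := List.mem_map.1 hmem
    rw [PySem.Dict.getD_counter]
    have : List.count k L ≤ L.length := List.count_le_length
    unfold PySem.List.len
    omega

theorem pv_sel {α : Type} (f : α → Int) (d : α) (t : List α) (b : α) (m : Int)
    (hmin : ∃ x ∈ t, f x < m) :
    (t.foldl (fun s c => if f c < s.2 then (c, f c) else s) (b, m)).1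
      = PySem.List.pyGetD t
          (((PySem.List.index? (t.map f)
              ((PySem.List.min? (t.map f) (fun v => v)).getD 0)).getD 0 : Nat) : Int) d := by
  induction t generalizing b m with
  | nil => obtain ⟨x, hx, _⟩ := hmin; cases hx
  | cons cnd r ih =>
    rw [List.map_cons, PySem.List.min?_id_cons]
    simp only [Option.getD_some]
    by_cases hc : ∀ x ∈ r, f cnd ≤ f x
    · have hmn : (r.map f).foldl min (f cnd) = f cnd :=
        le_antisymm (PySem.List.foldl_min_le _ _).1
          (pv_le_foldl_min _ _ (by
            intro y hy
            obtain ⟨x, hx, rfl⟩ := List.mem_map.1 hy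
            exact hc x hx))
      rw [hmn]
      unfold PySem.List.index?
      rw [List.idxOf?_cons, if_pos (by simp)]
      have hfc : f cnd < m := by
        obtain ⟨x, hx, hlt⟩ := hmin
        rcases List.mem_cons.1 hx with rfl | hxr
        · exact hlt
        · exact lt_of_le_of_lt (hc x hxr) hlt
      simp only [List.foldl_cons, if_pos hfc]
      rw [pv_sel_no_update f r cnd (f cnd) (fun x hx => not_lt.2 (hc x hx))]
      simp
    · simp only [not_forall, not_le] at hc
      obtain ⟨x0, hx0, hx0lt⟩ := hc
      obtain ⟨r0, rs, rfl⟩ : ∃ r0 rs, r = r0 :: rs := by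
        cases r with
        | nil => cases hx0
        | cons a l => exact ⟨a, l, rfl⟩
      have hmm : ((r0 :: rs).map f).foldl min (f cnd)
          = min (f cnd) ((rs.map f).foldl min (f r0)) := by
        simp only [List.map_cons, List.foldl_cons]
        exact pv_foldl_min_min _ _ _
      set mnr := (rs.map f).foldl min (f r0) with hmnr
      have hmnr_lt : mnr < f cnd := by
        rcases List.mem_cons.1 hx0 with rfl | hmem
        · exact lt_of_le_of_lt (PySem.List.foldl_min_le _ _).1 hx0lt
        · exact lt_of_le_of_lt ((PySem.List.foldl_min_le _ _).2 (f x0) (List.mem_map_of_mem hmem)) hx0lt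
      have hmn : ((r0 :: rs).map f).foldl min (f cnd) = mnr := by
        rw [hmm]; exact min_eq_right (le_of_lt hmnr_lt)
      rw [hmn]
      unfold PySem.List.index?
      rw [List.idxOf?_cons, if_neg (by simp; omega)]
      have hmemr : mnr ∈ (r0 :: rs).map f := by
        rcases PySem.List.foldl_min_mem (rs.map f) (f r0) with h | h
        · rw [List.map_cons, ← hmnr] at *
          rw [h]; exact List.mem_cons_self
        · rw [List.map_cons]
          exact List.mem_cons_of_mem _ h
      obtain ⟨k, hk⟩ : ∃ k, List.idxOf? mnr ((r0 :: rs).map f) = some k := by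
        cases h : List.idxOf? mnr ((r0 :: rs).map f) with
        | none => exact absurd hmemr (List.idxOf?_eq_none_iff.mp h)
        | some k => exact ⟨k, rfl⟩
      rw [hk]
      simp only [Option.map_some, Option.getD_some]
      have hshift : PySem.List.pyGetD (cnd :: r0 :: rs) (((k + 1 : Nat) : Int)) d
          = PySem.List.pyGetD (r0 :: rs) ((k : Nat) : Int) d := by
        rw [PySem.List.pyGetD_natCast, PySem.List.pyGetD_natCast, List.getD_cons_succ]
      rw [hshift]
      have hRHS : ∀ (b' : α) (m' : Int), (∃ x ∈ r0 :: rs, f x < m') →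
          ((r0 :: rs).foldl (fun s c => if f c < s.2 then (c, f c) else s) (b', m')).1
            = PySem.List.pyGetD (r0 :: rs) ((k : Nat) : Int) d := by
        intro b' m' hex
        rw [ih b' m' hex]
        rw [List.map_cons, PySem.List.min?_id_cons]
        simp only [Option.getD_some]
        rw [← hmnr]
        unfold PySem.List.index?
        have hk2 : List.idxOf? mnr (f r0 :: List.map f rs) = some k := hk
        rw [hk2]
        simp only [Option.getD_some]
      simp only [List.foldl_cons]
      by_cases hcm : f cnd < m
      · rw [show ((if f cnd < (b, m).2 then (cnd, f cnd) else (b, m)) : α × Int) = (cnd, f cnd) from by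
          rw [if_pos hcm]]
        exact hRHS cnd (f cnd) ⟨x0, hx0, hx0lt⟩
      · rw [show ((if f cnd < (b, m).2 then (cnd, f cnd) else (b, m)) : α × Int) = (b, m) from by
          rw [if_neg hcm]]
        apply hRHS
        obtain ⟨y, hy, hylt⟩ := hmin
        rcases List.mem_cons.1 hy with rfl | h
        · exact absurd hylt hcm
        · exact ⟨y, h, hylt⟩

-- ===== VERDICT (by name: the statement is the Claim_ definition above) =====
theorem find_best_guess_spec : Claim_equal_find_best_guess := by
  intro words hdom hpre
  unfold Spec_find_best_guess
  simp only [find_best_guess, find_best_guess_alt]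
  by_cases h2 : PySem.List.len words ≤ 2
  · rw [if_pos h2, if_pos h2]
  · rw [if_neg h2, if_neg h2]
    obtain ⟨w0, rest, rfl⟩ : ∃ w0 rest, words = w0 :: rest := by
      cases words with
      | nil => exact absurd rfl hpre
      | cons a l => exact ⟨a, l, rfl⟩
    rw [PySem.List.foldl_append_singleton_eq_map, List.nil_append]
    rw [List.map_congr_left (g := fun c => max_remaining_after_guess c (w0 :: rest))
      (fun c _ => pv_worstB_eq (w0 :: rest) c)]
    rw [pv_sel (fun c => max_remaining_after_guess c (w0 :: rest)) "" (w0 :: rest)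
      (PySem.List.pyGetD (w0 :: rest) 0 "") (PySem.List.len (w0 :: rest))
      ⟨w0, List.mem_cons_self, pv_worst_lt w0 (w0 :: rest) List.mem_cons_self⟩]
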